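-- pv_equiv track=rewrite | github.com/Kazun1998/library_for_python | Summation/Count.py | range_sum_dp
-- ===== SOURCE A (Python) =====
-- def range_sum_dp(ranges, S: int, Mod: int = None):
--     """ ranges = [(a_0, b_0), (a_1, b_1), ..., (a_{N-1}, b_{N-1})] としたとき,
--     a_i <= x_i <= b_i, x_0 + x_1 + ... + x_{N-1} = y を満たす整数の組の数を y = 0, 1, ..., S に対して求める.
--     (Mod が None でないときは, 組の数を Mod で割った余り.)
--
--     Args:
--         ranges: (a, b) の形のタプル
--         S (int): 上限
--         Mod (int, optional): 法. Defaults to None.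
--     """
--
--     dp = [0] * (S + 1); dp[0] = 1
--     prev_cum = [0] * (S + 1)
--
--     for a, b in ranges:
--         # dp の累積和を取る
--         prev_cum[0] = dp[0]
--         for x in range(1, S + 1):
--             prev_cum[x] = prev_cum[x - 1] + dp[x]
--
--         if Mod is not None:
--             for x in range(S):
--                 prev_cum[x] %= Mod
--
--         for x in range(S + 1):
--             if x < a:
--                 dp[x] = 0
--             elif x <= b:
--                 dp[x] = prev_cum[x - a]
--             else:
--                 dp[x] = prev_cum[x - a] - prev_cum[x - b - 1]
--
--     if Mod is None:
--         return dp
--     else: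
--         return [y % Mod for y in dp]
-- ===== SOURCE B (Python) =====
-- def range_sum_dp(ranges, S: int, Mod: int = None):
--     """Sliding-window DP: maintain the window sum incrementally (O(1) per cell)
--     instead of building a prefix-sum table and subtracting."""
--     dp = [1] + [0] * S
--     for a, b in ranges:
--         new = []
--         w = 0
--         for y in range(S + 1):
--             if 0 <= y - a <= S:
--                 w += dp[y - a]
--             if 0 <= y - b - 1 <= S:
--                 w -= dp[y - b - 1]
--             new.append(0 if y < a else w)
--         dp = new if Mod is None else [v % Mod for v in new]
--     return dp if Mod is None else [v % Mod for v in dp]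
-- ===== Notes on version B (the rewrite author's own statement) =====
-- stated objective: alternative
-- what changed: each dp row is computed in a single pass with an incrementally maintained sliding-window sum (add dp[y-a], drop dp[y-b-1] as y advances) instead of A's separately built prefix-sum table queried twice and subtracted; B reduces rows mod Mod per round, which agrees with A's partial cum-reduction up to congruence
import Mathlib
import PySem

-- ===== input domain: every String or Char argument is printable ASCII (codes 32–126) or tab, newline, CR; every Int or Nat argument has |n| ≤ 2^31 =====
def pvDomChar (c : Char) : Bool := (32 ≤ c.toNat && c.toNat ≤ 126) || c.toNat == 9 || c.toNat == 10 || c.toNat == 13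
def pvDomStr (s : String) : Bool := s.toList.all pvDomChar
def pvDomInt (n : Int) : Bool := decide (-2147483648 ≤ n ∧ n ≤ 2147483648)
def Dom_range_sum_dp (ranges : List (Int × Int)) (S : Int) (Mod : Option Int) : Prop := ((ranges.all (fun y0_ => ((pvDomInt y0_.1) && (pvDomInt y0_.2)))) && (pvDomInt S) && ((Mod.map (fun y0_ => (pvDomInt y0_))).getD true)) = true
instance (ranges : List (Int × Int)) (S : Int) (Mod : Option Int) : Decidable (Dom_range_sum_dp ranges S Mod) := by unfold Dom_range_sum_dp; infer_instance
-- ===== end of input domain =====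

-- B replaces A's per-range prefix-sum table (built, partially reduced mod Mod, queried twice and
-- subtracted) by a single pass maintaining the window sum incrementally; equal output on Pre_.

-- ===== PORT A =====
-- one iteration of A's `for a, b in ranges` loop.  Python allocates prev_cum once outside the loop,
-- but every cell prev_cum[0..S] is overwritten before it is read in each iteration, so re-allocating
-- it each round yields identical values.
def rangeSumCum (S : Int) (dp cum0 : List Int) : List Int :=
  (PySem.List.pyRange 1 (S + 1) 1).foldl
    (fun c x => PySem.List.pySetD c x (PySem.List.pyGetD c (x - 1) 0 + PySem.List.pyGetD dp x 0)) cum0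

def rangeSumRoundA (S : Int) (Mod : Option Int) (dp : List Int) (a b : Int) : List Int :=
  let cum0 := PySem.List.pySetD (List.replicate (S + 1).toNat 0) 0 (PySem.List.pyGetD dp 0 0)
  let cum1 := rangeSumCum S dp cum0
  let cum2 := match Mod with
    | none => cum1
    | some M => (PySem.List.pyRange 0 S 1).foldl
        (fun c x => PySem.List.pySetD c x (PySem.Int.mod (PySem.List.pyGetD c x 0) M)) cum1
  (PySem.List.pyRange 0 (S + 1) 1).foldl
    (fun d x => PySem.List.pySetD d x
      (if x < a then 0
       else if x ≤ b then PySem.List.pyGetD cum2 (x - a) 0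
       else PySem.List.pyGetD cum2 (x - a) 0 - PySem.List.pyGetD cum2 (x - b - 1) 0)) dp

def range_sum_dp (ranges : List (Int × Int)) (S : Int) (Mod : Option Int) : List Int :=
  let dp := ranges.foldl (fun dp ab => rangeSumRoundA S Mod dp ab.1 ab.2)
    (PySem.List.pySetD (List.replicate (S + 1).toNat 0) 0 1)
  match Mod with
  | none => dp
  | some M => dp.map (fun y => PySem.Int.mod y M)

-- ===== PORT B =====
-- one iteration of B's loop: sliding-window sum, state = (row built so far, current window sum w)
def rangeSumRoundB (S : Int) (Mod : Option Int) (dp : List Int) (a b : Int) : List Int :=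
  let new := ((PySem.List.pyRange 0 (S + 1) 1).foldl
    (fun (st : List Int × Int) y =>
      let w1 := if 0 ≤ y - a ∧ y - a ≤ S then st.2 + PySem.List.pyGetD dp (y - a) 0 else st.2
      let w2 := if 0 ≤ y - b - 1 ∧ y - b - 1 ≤ S then w1 - PySem.List.pyGetD dp (y - b - 1) 0 else w1
      (st.1 ++ [if y < a then 0 else w2], w2)) ([], 0)).1
  match Mod with
  | none => new
  | some M => new.map (fun v => PySem.Int.mod v M)

def range_sum_dp_alt (ranges : List (Int × Int)) (S : Int) (Mod : Option Int) : List Int :=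
  let dp := ranges.foldl (fun dp ab => rangeSumRoundB S Mod dp ab.1 ab.2)
    (1 :: List.replicate S.toNat 0)
  match Mod with
  | none => dp
  | some M => dp.map (fun v => PySem.Int.mod v M)

-- ===== PRECONDITION & SPEC =====
-- Pre_ admits exactly the inputs on which A returns: S < 0 (dp[0] = 1 IndexError), Mod = 0
-- (ZeroDivisionError), or a pair with a ≤ S and (a < 0 or b < -1) (prev_cum IndexError) make A raise.
def Pre_range_sum_dp (ranges : List (Int × Int)) (S : Int) (Mod : Option Int) : Prop :=
  0 ≤ S ∧ Mod ≠ some 0 ∧ ∀ p ∈ ranges, S < p.1 ∨ (0 ≤ p.1 ∧ -1 ≤ p.2)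
instance (ranges : List (Int × Int)) (S : Int) (Mod : Option Int) : Decidable (Pre_range_sum_dp ranges S Mod) := by unfold Pre_range_sum_dp; infer_instance
def pvWitness_range_sum_dp : (List (Int × Int)) × Int × Option Int := ([(0, 2), (1, 1)], 3, some 7)

def Spec_range_sum_dp (ranges : List (Int × Int)) (S : Int) (Mod : Option Int) (out : List Int) : Prop := out = range_sum_dp_alt ranges S Mod
instance (ranges : List (Int × Int)) (S : Int) (Mod : Option Int) (out : List Int) : Decidable (Spec_range_sum_dp ranges S Mod out) := by unfold Spec_range_sum_dp; infer_instance

-- ===== CLAIM (what is proved, stated in full; the proofs are below) =====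
def Claim_equal_range_sum_dp : Prop := ∀ (ranges : List (Int × Int)) (S : Int) (Mod : Option Int), Dom_range_sum_dp ranges S Mod → Pre_range_sum_dp ranges S Mod → Spec_range_sum_dp ranges S Mod (range_sum_dp ranges S Mod)

-- ===== LEMMAS AND PROOFS =====

-- row length
def nN (S : Int) : Nat := (S + 1).toNat

-- prefix sums
def prefN (dp : List Int) (j : Nat) : Int := (dp.take (j + 1)).sum
def prefI (dp : List Int) (j : Int) : Int := if 0 ≤ j then prefN dp j.toNat else 0

-- "equal" (Mod = none) resp. "congruent mod M" (Mod = some M)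
def mcong (Mod : Option Int) (u v : Int) : Prop :=
  match Mod with
  | none => u = v
  | some M => Int.ModEq M u v

-- the (partially reduced) prefix table A actually queries
def redc (Mod : Option Int) (dp : List Int) (S : Int) (j : Nat) : Int :=
  match Mod with
  | none => prefN dp j
  | some M => if j < S.toNat then PySem.Int.mod (prefN dp j) M else prefN dp j

-- entry formulas of one round of A resp. B
def entA (Mod : Option Int) (S : Int) (dp : List Int) (a b : Int) (j : Nat) : Int :=
  if (j : Int) < a then 0
  else if (j : Int) ≤ b then redc Mod dp S ((j : Int) - a).toNat
  else redc Mod dp S ((j : Int) - a).toNat - redc Mod dp S ((j : Int) - b - 1).toNat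

def coreB (S a b : Int) (dp : List Int) (j : Int) : Int :=
  if j < a then 0 else prefI dp (j - a) - prefI dp (j - b - 1)

def entB (Mod : Option Int) (S a b : Int) (dp : List Int) (j : Int) : Int :=
  match Mod with
  | none => coreB S a b dp j
  | some M => PySem.Int.mod (coreB S a b dp j) M

lemma prefN_zero (dp : List Int) : prefN dp 0 = dp.getD 0 0 := by cases dp <;> simp [prefN]

lemma prefN_succ (dp : List Int) (j : Nat) :
    prefN dp (j + 1) = prefN dp j + dp.getD (j + 1) 0 := by
  simp [prefN, List.take_add_one, List.getD_eq_getElem?_getD]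
  cases h : dp[j+1]? <;> simp [h] <;> ring

lemma prefI_nonneg (dp : List Int) (j : Int) (h : 0 ≤ j) : prefI dp j = prefN dp j.toNat := by
  unfold prefI; rw [if_pos h]

lemma prefI_neg (dp : List Int) (j : Int) (h : j < 0) : prefI dp j = 0 := by
  unfold prefI; rw [if_neg (by omega)]

lemma prefI_succ (dp : List Int) (j : Int) (hj : 0 ≤ j) :
    prefI dp j = prefI dp (j - 1) + dp.getD j.toNat 0 := by
  rcases eq_or_lt_of_le hj with h | h
  · rw [← h, prefI_nonneg dp 0 le_rfl, prefI_neg dp (0 - 1) (by omega)]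
    simp [prefN_zero]
  · rw [prefI_nonneg dp j hj, prefI_nonneg dp (j - 1) (by omega),
      show j.toNat = (j - 1).toNat + 1 by omega]
    exact prefN_succ dp (j - 1).toNat

lemma getD_set_self (l : List Int) (n : Nat) (v : Int) (h : n < l.length) :
    (l.set n v).getD n 0 = v := by
  rw [List.getD_eq_getElem?_getD]; simp [h]

lemma getD_set_ne (l : List Int) (n m : Nat) (v : Int) (h : m ≠ n) :
    (l.set n v).getD m 0 = l.getD m 0 := by
  rw [List.getD_eq_getElem?_getD, List.getElem?_set_ne (by omega), ← List.getD_eq_getElem?_getD]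

lemma pySetD_zero (xs : List Int) (v : Int) : PySem.List.pySetD xs 0 v = xs.set 0 v :=
  PySem.List.pySetD_natCast xs 0 v

lemma pymod_modEq (a M : Int) : Int.ModEq M (PySem.Int.mod a M) a := by
  have h := PySem.Int.floordiv_mul_add_mod a M
  have hd : M ∣ a - PySem.Int.mod a M := ⟨PySem.Int.floordiv a M, by linear_combination -h⟩
  exact Int.modEq_iff_dvd.mpr hd

lemma pymod_eq_of_modEq {M u v : Int} (hM : M ≠ 0) (h : Int.ModEq M u v) :
    PySem.Int.mod u M = PySem.Int.mod v M := by
  have hc : Int.ModEq M (PySem.Int.mod u M) (PySem.Int.mod v M) :=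
    ((pymod_modEq u M).trans h).trans (pymod_modEq v M).symm
  have hd : M ∣ (PySem.Int.mod v M - PySem.Int.mod u M) := Int.ModEq.dvd hc
  rcases lt_or_gt_of_ne hM with hneg | hpos
  · obtain ⟨b1l, b1u⟩ := PySem.Int.mod_neg_bounds (a := u) hneg
    obtain ⟨b2l, b2u⟩ := PySem.Int.mod_neg_bounds (a := v) hneg
    have hd' : (-M) ∣ (PySem.Int.mod v M - PySem.Int.mod u M) := (neg_dvd).mpr hd
    have h0 := Int.eq_zero_of_abs_lt_dvd hd' (by rw [abs_lt]; constructor <;> omega)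
    omega
  · have b1l := PySem.Int.mod_nonneg (a := u) hpos
    have b1u := PySem.Int.mod_lt (a := u) hpos
    have b2l := PySem.Int.mod_nonneg (a := v) hpos
    have b2u := PySem.Int.mod_lt (a := v) hpos
    have h0 := Int.eq_zero_of_abs_lt_dvd hd (by rw [abs_lt]; constructor <;> omega)
    omega

lemma mcong_add {Mod : Option Int} {u v u' v' : Int} (h : mcong Mod u v) (h' : mcong Mod u' v') :
    mcong Mod (u + u') (v + v') := by
  cases Mod with
  | none => simp_all [mcong]
  | some M => exact Int.ModEq.add h h'

lemma mcong_sub {Mod : Option Int} {u v u' v' : Int} (h : mcong Mod u v) (h' : mcong Mod u' v') :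
    mcong Mod (u - u') (v - v') := by
  cases Mod with
  | none => simp_all [mcong]
  | some M => exact Int.ModEq.sub h h'

lemma mcong_refl {Mod : Option Int} (u : Int) : mcong Mod u u := by
  cases Mod with
  | none => rfl
  | some M => exact Int.ModEq.refl u

lemma mcong_of_eq {Mod : Option Int} {u v : Int} (h : u = v) : mcong Mod u v := by
  subst h
  exact mcong_refl u

lemma mcong_trans {Mod : Option Int} {u v w : Int} (h : mcong Mod u v) (h' : mcong Mod v w) :
    mcong Mod u w := by
  cases Mod with
  | none => simp_all [mcong]
  | some M => exact Int.ModEq.trans h h'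

lemma prefN_cong {Mod : Option Int} {dpA dpB : List Int}
    (h : ∀ i : Nat, mcong Mod (dpA.getD i 0) (dpB.getD i 0)) :
    ∀ j : Nat, mcong Mod (prefN dpA j) (prefN dpB j) := by
  intro j
  induction j with
  | zero => rw [prefN_zero, prefN_zero]; exact h 0
  | succ j ih => rw [prefN_succ, prefN_succ]; exact mcong_add ih (h (j + 1))

-- generic loop shapes for A's inner loops --------------------------------------

-- overwrite loop: for x in range(k): d[x] = g(x)   (g does not read d)
lemma foldl_write_spec (g : Int → Int) (d0 : List Int) (k : Nat) :
    (((PySem.List.pyRange 0 (k : Int) 1).foldl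
        (fun d x => PySem.List.pySetD d x (g x)) d0).length = d0.length) ∧
    ∀ j : Nat, j < d0.length →
      ((PySem.List.pyRange 0 (k : Int) 1).foldl
        (fun d x => PySem.List.pySetD d x (g x)) d0).getD j 0 =
      if j < k then g (j : Int) else d0.getD j 0 := by
  induction k with
  | zero => simp [PySem.List.pyRange_one_eq_nil]
  | succ k ih =>
    have hsplit : PySem.List.pyRange 0 (((k+1 : Nat)) : Int) 1
        = PySem.List.pyRange 0 (k : Int) 1 ++ [(k : Int)] := by
      push_cast
      exact PySem.List.pyRange_one_succ_right (by positivity)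
    rw [hsplit, List.foldl_append]
    simp only [List.foldl_cons, List.foldl_nil]
    rw [PySem.List.pySetD_natCast]
    refine ⟨by simp [ih.1], ?_⟩
    intro j hj
    by_cases hjk : j = k
    · subst hjk
      rw [getD_set_self _ _ _ (by rw [ih.1]; exact hj)]
      simp
    · rw [getD_set_ne _ _ _ _ (by omega), ih.2 j hj]
      by_cases h1 : j < k
      · rw [if_pos h1, if_pos (by omega)]
      · rw [if_neg h1, if_neg (by omega)]

-- in-place map loop: for x in range(k): c[x] = f(c[x])
lemma foldl_mapinplace_spec (f : Int → Int) (c0 : List Int) (k : Nat) :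
    (((PySem.List.pyRange 0 (k : Int) 1).foldl
        (fun c x => PySem.List.pySetD c x (f (PySem.List.pyGetD c x 0))) c0).length = c0.length) ∧
    ∀ j : Nat, j < c0.length →
      ((PySem.List.pyRange 0 (k : Int) 1).foldl
        (fun c x => PySem.List.pySetD c x (f (PySem.List.pyGetD c x 0))) c0).getD j 0 =
      if j < k then f (c0.getD j 0) else c0.getD j 0 := by
  induction k with
  | zero => simp [PySem.List.pyRange_one_eq_nil]
  | succ k ih =>
    have hsplit : PySem.List.pyRange 0 (((k+1 : Nat)) : Int) 1
        = PySem.List.pyRange 0 (k : Int) 1 ++ [(k : Int)] := by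
      push_cast
      exact PySem.List.pyRange_one_succ_right (by positivity)
    rw [hsplit, List.foldl_append]
    simp only [List.foldl_cons, List.foldl_nil]
    rw [PySem.List.pySetD_natCast, PySem.List.pyGetD_natCast]
    refine ⟨by simp [ih.1], ?_⟩
    intro j hj
    by_cases hjk : j = k
    · subst hjk
      rw [getD_set_self _ _ _ (by rw [ih.1]; exact hj), ih.2 j hj]
      simp
    · rw [getD_set_ne _ _ _ _ (by omega), ih.2 j hj]
      by_cases h1 : j < k
      · rw [if_pos h1, if_pos (by omega)]
      · rw [if_neg h1, if_neg (by omega)]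

-- cumulative loop: for x in range(1, 1+k): c[x] = c[x-1] + dp[x]
lemma foldl_cum_spec (dp c0 : List Int) (h0 : c0.getD 0 0 = prefN dp 0) (k : Nat) :
    (((PySem.List.pyRange 1 (1 + (k : Int)) 1).foldl
        (fun c x => PySem.List.pySetD c x
          (PySem.List.pyGetD c (x - 1) 0 + PySem.List.pyGetD dp x 0)) c0).length = c0.length) ∧
    ∀ j : Nat, j ≤ k → j < c0.length →
      ((PySem.List.pyRange 1 (1 + (k : Int)) 1).foldl
        (fun c x => PySem.List.pySetD c x
          (PySem.List.pyGetD c (x - 1) 0 + PySem.List.pyGetD dp x 0)) c0).getD j 0 = prefN dp j := by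
  induction k with
  | zero =>
    have h1 : PySem.List.pyRange 1 (1 + ((0:Nat):Int)) 1 = [] := by
      rw [show (1 + ((0:Nat):Int)) = 1 by norm_num]
      exact PySem.List.pyRange_one_eq_nil (le_refl 1)
    rw [h1]
    simp only [List.foldl_nil]
    refine ⟨by simp, ?_⟩
    intro j hj hl
    have hj0 : j = 0 := by omega
    subst hj0
    exact h0
  | succ k ih =>
    have hsplit : PySem.List.pyRange 1 (1 + ((k+1 : Nat) : Int)) 1
        = PySem.List.pyRange 1 (1 + (k : Int)) 1 ++ [1 + (k : Int)] := by
      push_cast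
      have := PySem.List.pyRange_one_succ_right (a := 1) (b := 1 + (k:Int)) (by omega)
      rw [show (1 + ((k:Int)+1)) = (1 + (k:Int)) + 1 by ring]
      exact this
    rw [hsplit, List.foldl_append]
    simp only [List.foldl_cons, List.foldl_nil]
    set r := (PySem.List.pyRange 1 (1 + (k : Int)) 1).foldl
        (fun c x => PySem.List.pySetD c x
          (PySem.List.pyGetD c (x - 1) 0 + PySem.List.pyGetD dp x 0)) c0 with hr
    have hcast : (1 + (k : Int)) = (((k+1 : Nat)) : Int) := by push_cast; ring
    rw [hcast, PySem.List.pySetD_natCast]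
    refine ⟨by simp [ih.1], ?_⟩
    intro j hj hl
    have hval : PySem.List.pyGetD r ((((k+1 : Nat)) : Int) - 1) 0 = r.getD k 0 := by
      rw [show ((((k+1 : Nat)) : Int) - 1) = ((k : Nat) : Int) by push_cast; ring,
        PySem.List.pyGetD_natCast]
    by_cases hjk : j = k + 1
    · subst hjk
      rw [getD_set_self _ _ _ (by rw [ih.1]; exact hl)]
      rw [hval, ih.2 k (le_refl k) (by omega), PySem.List.pyGetD_natCast]
      simp [prefN_succ]
    · rw [getD_set_ne _ _ _ _ (by omega)]
      exact ih.2 j (by omega) hl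

-- definitional equations of one A-round at a literal Mod (each is rfl)
lemma rangeSumRoundA_none (S : Int) (dp : List Int) (a b : Int) :
    rangeSumRoundA S none dp a b =
    (PySem.List.pyRange 0 (S + 1) 1).foldl
      (fun d x => PySem.List.pySetD d x
        (if x < a then 0
         else if x ≤ b then PySem.List.pyGetD (rangeSumCum S dp
            (PySem.List.pySetD (List.replicate (S + 1).toNat 0) 0 (PySem.List.pyGetD dp 0 0))) (x - a) 0
         else PySem.List.pyGetD (rangeSumCum S dp
            (PySem.List.pySetD (List.replicate (S + 1).toNat 0) 0 (PySem.List.pyGetD dp 0 0))) (x - a) 0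
           - PySem.List.pyGetD (rangeSumCum S dp
            (PySem.List.pySetD (List.replicate (S + 1).toNat 0) 0 (PySem.List.pyGetD dp 0 0))) (x - b - 1) 0)) dp := rfl

lemma rangeSumRoundA_some (S M : Int) (dp : List Int) (a b : Int) :
    rangeSumRoundA S (some M) dp a b =
    (PySem.List.pyRange 0 (S + 1) 1).foldl
      (fun d x => PySem.List.pySetD d x
        (if x < a then 0
         else if x ≤ b then PySem.List.pyGetD ((PySem.List.pyRange 0 S 1).foldl
              (fun c x => PySem.List.pySetD c x (PySem.Int.mod (PySem.List.pyGetD c x 0) M))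
              (rangeSumCum S dp
                (PySem.List.pySetD (List.replicate (S + 1).toNat 0) 0 (PySem.List.pyGetD dp 0 0)))) (x - a) 0
         else PySem.List.pyGetD ((PySem.List.pyRange 0 S 1).foldl
              (fun c x => PySem.List.pySetD c x (PySem.Int.mod (PySem.List.pyGetD c x 0) M))
              (rangeSumCum S dp
                (PySem.List.pySetD (List.replicate (S + 1).toNat 0) 0 (PySem.List.pyGetD dp 0 0)))) (x - a) 0
           - PySem.List.pyGetD ((PySem.List.pyRange 0 S 1).foldl
              (fun c x => PySem.List.pySetD c x (PySem.Int.mod (PySem.List.pyGetD c x 0) M))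
              (rangeSumCum S dp
                (PySem.List.pySetD (List.replicate (S + 1).toNat 0) 0 (PySem.List.pyGetD dp 0 0)))) (x - b - 1) 0)) dp := rfl

-- the common branch shape of A's final loop, with table lookups replaced by their values
lemma branch_eq (S : Int) (hS : 0 ≤ S) (table : List Int) (R : Nat → Int) (a b : Int) (j : Nat)
    (hjS : (j : Int) ≤ S)
    (htab : ∀ i : Nat, i < nN S → table.getD i 0 = R i)
    (hab : S < a ∨ (0 ≤ a ∧ -1 ≤ b)) :
    (if (j : Int) < a then 0
     else if (j : Int) ≤ b then PySem.List.pyGetD table ((j : Int) - a) 0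
     else PySem.List.pyGetD table ((j : Int) - a) 0 - PySem.List.pyGetD table ((j : Int) - b - 1) 0)
    = (if (j : Int) < a then 0
       else if (j : Int) ≤ b then R ((j : Int) - a).toNat
       else R ((j : Int) - a).toNat - R ((j : Int) - b - 1).toNat) := by
  by_cases h1 : (j : Int) < a
  · rw [if_pos h1, if_pos h1]
  · rw [if_neg h1, if_neg h1]
    have hb' : 0 ≤ a ∧ -1 ≤ b := by
      rcases hab with h | h
      · exact absurd h (by omega)
      · exact h
    have hja : (0:Int) ≤ (j : Int) - a := by omega
    have hjan : ((j : Int) - a).toNat < nN S := by unfold nN; omega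
    have e1 : PySem.List.pyGetD table ((j : Int) - a) 0 = R ((j : Int) - a).toNat := by
      rw [PySem.List.pyGetD_of_nonneg _ _ hja]
      exact htab _ hjan
    by_cases h2 : (j : Int) ≤ b
    · rw [if_pos h2, if_pos h2, e1]
    · rw [if_neg h2, if_neg h2]
      have hjb : (0:Int) ≤ (j : Int) - b - 1 := by omega
      have hjbn : ((j : Int) - b - 1).toNat < nN S := by unfold nN; omega
      have e2 : PySem.List.pyGetD table ((j : Int) - b - 1) 0 = R ((j : Int) - b - 1).toNat := by
        rw [PySem.List.pyGetD_of_nonneg _ _ hjb]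
        exact htab _ hjbn
      rw [e1, e2]

-- A's row, entrywise
lemma roundA_spec (S : Int) (Mod : Option Int) (hS : 0 ≤ S) (dp : List Int)
    (hdp : dp.length = nN S) (a b : Int) (hab : S < a ∨ (0 ≤ a ∧ -1 ≤ b)) :
    (rangeSumRoundA S Mod dp a b).length = nN S ∧
    ∀ j : Nat, j < nN S →
      (rangeSumRoundA S Mod dp a b).getD j 0 = entA Mod S dp a b j := by
  have hn : nN S = S.toNat + 1 := by unfold nN; omega
  have hc0len : (PySem.List.pySetD (List.replicate (S + 1).toNat 0) 0
      (PySem.List.pyGetD dp 0 0)).length = nN S := by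
    rw [pySetD_zero]
    simp [nN]
  have hc00 : (PySem.List.pySetD (List.replicate (S + 1).toNat 0) 0
      (PySem.List.pyGetD dp 0 0)).getD 0 0 = prefN dp 0 := by
    rw [PySem.List.pyGetD_zero, pySetD_zero,
      getD_set_self _ _ _ (by simp; omega), prefN_zero]
  have hcumrw : PySem.List.pyRange 1 (S + 1) 1
      = PySem.List.pyRange 1 (1 + ((S.toNat : Nat) : Int)) 1 := by
    congr 1
    omega
  have hcum := foldl_cum_spec dp _ hc00 S.toNat
  have hc1len : (rangeSumCum S dp (PySem.List.pySetD (List.replicate (S + 1).toNat 0) 0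
      (PySem.List.pyGetD dp 0 0))).length = nN S := by
    unfold rangeSumCum
    rw [hcumrw, hcum.1, hc0len]
  have hc1 : ∀ j : Nat, j < nN S → (rangeSumCum S dp
      (PySem.List.pySetD (List.replicate (S + 1).toNat 0) 0
        (PySem.List.pyGetD dp 0 0))).getD j 0 = prefN dp j := by
    intro j hj
    unfold rangeSumCum
    rw [hcumrw]
    exact hcum.2 j (by omega) (by rw [hc0len]; exact hj)
  have hwrw : PySem.List.pyRange 0 (S + 1) 1
      = PySem.List.pyRange 0 ((nN S : Nat) : Int) 1 := by
    congr 1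
    omega
  cases Mod with
  | none =>
    have hw := foldl_write_spec
      (fun x => if x < a then 0
        else if x ≤ b then PySem.List.pyGetD (rangeSumCum S dp
            (PySem.List.pySetD (List.replicate (S + 1).toNat 0) 0 (PySem.List.pyGetD dp 0 0))) (x - a) 0
        else PySem.List.pyGetD (rangeSumCum S dp
            (PySem.List.pySetD (List.replicate (S + 1).toNat 0) 0 (PySem.List.pyGetD dp 0 0))) (x - a) 0
          - PySem.List.pyGetD (rangeSumCum S dp
            (PySem.List.pySetD (List.replicate (S + 1).toNat 0) 0 (PySem.List.pyGetD dp 0 0))) (x - b - 1) 0)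
      dp (nN S)
    have htab : ∀ i : Nat, i < nN S → (rangeSumCum S dp
        (PySem.List.pySetD (List.replicate (S + 1).toNat 0) 0
          (PySem.List.pyGetD dp 0 0))).getD i 0 = redc none dp S i := fun i hi => hc1 i hi
    constructor
    · rw [rangeSumRoundA_none, hwrw]
      exact hw.1.trans hdp
    · intro j hj
      rw [rangeSumRoundA_none, hwrw]
      refine (hw.2 j (by rw [hdp]; exact hj)).trans ?_
      rw [if_pos hj]
      refine (branch_eq S hS _ (redc none dp S) a b j (by unfold nN at hj; omega) htab hab).trans ?_
      simp only [entA]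
  | some M =>
    have hSrw : PySem.List.pyRange 0 S 1 = PySem.List.pyRange 0 ((S.toNat : Nat) : Int) 1 := by
      congr 1
      omega
    have hm := foldl_mapinplace_spec (fun v => PySem.Int.mod v M)
      (rangeSumCum S dp (PySem.List.pySetD (List.replicate (S + 1).toNat 0) 0
        (PySem.List.pyGetD dp 0 0))) S.toNat
    have htab : ∀ i : Nat, i < nN S → ((PySem.List.pyRange 0 S 1).foldl
        (fun c x => PySem.List.pySetD c x (PySem.Int.mod (PySem.List.pyGetD c x 0) M))
        (rangeSumCum S dp (PySem.List.pySetD (List.replicate (S + 1).toNat 0) 0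
          (PySem.List.pyGetD dp 0 0)))).getD i 0 = redc (some M) dp S i := by
      intro i hi
      rw [hSrw]
      refine (hm.2 i (by rw [hc1len]; exact hi)).trans ?_
      rw [hc1 i hi]
      rfl
    have hlentab : ((PySem.List.pyRange 0 S 1).foldl
        (fun c x => PySem.List.pySetD c x (PySem.Int.mod (PySem.List.pyGetD c x 0) M))
        (rangeSumCum S dp (PySem.List.pySetD (List.replicate (S + 1).toNat 0) 0
          (PySem.List.pyGetD dp 0 0)))).length = nN S := by
      rw [hSrw]
      exact hm.1.trans hc1len
    have hw := foldl_write_spec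
      (fun x => if x < a then 0
        else if x ≤ b then PySem.List.pyGetD ((PySem.List.pyRange 0 S 1).foldl
            (fun c x => PySem.List.pySetD c x (PySem.Int.mod (PySem.List.pyGetD c x 0) M))
            (rangeSumCum S dp (PySem.List.pySetD (List.replicate (S + 1).toNat 0) 0
              (PySem.List.pyGetD dp 0 0)))) (x - a) 0
        else PySem.List.pyGetD ((PySem.List.pyRange 0 S 1).foldl
            (fun c x => PySem.List.pySetD c x (PySem.Int.mod (PySem.List.pyGetD c x 0) M))
            (rangeSumCum S dp (PySem.List.pySetD (List.replicate (S + 1).toNat 0) 0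
              (PySem.List.pyGetD dp 0 0)))) (x - a) 0
          - PySem.List.pyGetD ((PySem.List.pyRange 0 S 1).foldl
            (fun c x => PySem.List.pySetD c x (PySem.Int.mod (PySem.List.pyGetD c x 0) M))
            (rangeSumCum S dp (PySem.List.pySetD (List.replicate (S + 1).toNat 0) 0
              (PySem.List.pyGetD dp 0 0)))) (x - b - 1) 0)
      dp (nN S)
    constructor
    · rw [rangeSumRoundA_some, hwrw]
      exact hw.1.trans hdp
    · intro j hj
      rw [rangeSumRoundA_some, hwrw]
      refine (hw.2 j (by rw [hdp]; exact hj)).trans ?_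
      rw [if_pos hj]
      refine (branch_eq S hS _ (redc (some M) dp S) a b j (by unfold nN at hj; omega) htab hab).trans ?_
      simp only [entA]

-- B's sliding-window value after k steps
def bW (S a b : Int) (dp : List Int) : Nat → Int
  | 0 => 0
  | Nat.succ y =>
      let w1 := if 0 ≤ (y : Int) - a ∧ (y : Int) - a ≤ S
        then bW S a b dp y + PySem.List.pyGetD dp ((y : Int) - a) 0 else bW S a b dp y
      if 0 ≤ (y : Int) - b - 1 ∧ (y : Int) - b - 1 ≤ S
        then w1 - PySem.List.pyGetD dp ((y : Int) - b - 1) 0 else w1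

lemma bloop_spec (S a b : Int) (dp : List Int) (k : Nat) :
    (PySem.List.pyRange 0 (k : Int) 1).foldl
      (fun (st : List Int × Int) y =>
        let w1 := if 0 ≤ y - a ∧ y - a ≤ S then st.2 + PySem.List.pyGetD dp (y - a) 0 else st.2
        let w2 := if 0 ≤ y - b - 1 ∧ y - b - 1 ≤ S then w1 - PySem.List.pyGetD dp (y - b - 1) 0 else w1
        (st.1 ++ [if y < a then 0 else w2], w2)) ([], 0) =
    ((List.range k).map (fun (y : Nat) => if (y : Int) < a then 0 else bW S a b dp (y + 1)),
      bW S a b dp k) := by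
  induction k with
  | zero => simp [PySem.List.pyRange_one_eq_nil, bW]
  | succ k ih =>
    have hsplit : PySem.List.pyRange 0 (((k+1 : Nat)) : Int) 1
        = PySem.List.pyRange 0 (k : Int) 1 ++ [(k : Int)] := by
      push_cast
      exact PySem.List.pyRange_one_succ_right (by positivity)
    rw [hsplit, List.foldl_append, ih]
    simp only [List.foldl_cons, List.foldl_nil, List.range_succ, List.map_append, List.map_cons,
      List.map_nil]
    rfl

lemma bW_closed (S a b : Int) (dp : List Int) (hS : 0 ≤ S) (ha : 0 ≤ a) (hb : -1 ≤ b)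
    (k : Nat) (hk : (k : Int) ≤ S + 1) :
    bW S a b dp k = prefI dp ((k : Int) - 1 - a) - prefI dp ((k : Int) - 1 - b - 1) := by
  induction k with
  | zero =>
    rw [bW, prefI_neg dp _ (by omega), prefI_neg dp _ (by omega)]
    norm_num
  | succ k ih =>
    have ihv := ih (by push_cast at hk ⊢; omega)
    have hka : ((k:Int) - a ≤ S) := by push_cast at hk; omega
    have hkb : ((k:Int) - b - 1 ≤ S) := by push_cast at hk; omega
    rw [bW]
    have T1 : (if 0 ≤ (k : Int) - a ∧ (k : Int) - a ≤ S
        then bW S a b dp k + PySem.List.pyGetD dp ((k : Int) - a) 0 else bW S a b dp k)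
        = prefI dp ((k : Int) - a) - prefI dp ((k : Int) - 1 - b - 1) := by
      by_cases g1 : 0 ≤ (k : Int) - a
      · rw [if_pos ⟨g1, hka⟩, ihv, PySem.List.pyGetD_of_nonneg (h := g1),
          prefI_succ dp ((k : Int) - a) g1,
          show (k : Int) - a - 1 = (k : Int) - 1 - a by ring]
        ring
      · rw [if_neg (by tauto), ihv, prefI_neg dp ((k : Int) - a) (by omega),
          prefI_neg dp ((k : Int) - 1 - a) (by omega)]
    have T2 : (if 0 ≤ (k : Int) - b - 1 ∧ (k : Int) - b - 1 ≤ S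
        then (prefI dp ((k : Int) - a) - prefI dp ((k : Int) - 1 - b - 1))
          - PySem.List.pyGetD dp ((k : Int) - b - 1) 0
        else (prefI dp ((k : Int) - a) - prefI dp ((k : Int) - 1 - b - 1)))
        = prefI dp ((k : Int) - a) - prefI dp ((k : Int) - b - 1) := by
      by_cases g2 : 0 ≤ (k : Int) - b - 1
      · rw [if_pos ⟨g2, hkb⟩, PySem.List.pyGetD_of_nonneg (h := g2),
          prefI_succ dp ((k : Int) - b - 1) g2,
          show (k : Int) - b - 1 - 1 = (k : Int) - 1 - b - 1 by ring]
        ring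
      · rw [if_neg (by tauto), prefI_neg dp ((k : Int) - b - 1) (by omega),
          prefI_neg dp ((k : Int) - 1 - b - 1) (by omega)]
    rw [T1, T2, show ((k+1 : Nat) : Int) - 1 - a = (k : Int) - a by push_cast; ring,
      show ((k+1 : Nat) : Int) - 1 - b - 1 = (k : Int) - b - 1 by push_cast; ring]

-- definitional equations of one B-round at a literal Mod (each is rfl)
lemma rangeSumRoundB_none (S : Int) (dp : List Int) (a b : Int) :
    rangeSumRoundB S none dp a b =
    ((PySem.List.pyRange 0 (S + 1) 1).foldl
      (fun (st : List Int × Int) y =>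
        let w1 := if 0 ≤ y - a ∧ y - a ≤ S then st.2 + PySem.List.pyGetD dp (y - a) 0 else st.2
        let w2 := if 0 ≤ y - b - 1 ∧ y - b - 1 ≤ S then w1 - PySem.List.pyGetD dp (y - b - 1) 0 else w1
        (st.1 ++ [if y < a then 0 else w2], w2)) ([], 0)).1 := rfl

lemma rangeSumRoundB_some (S M : Int) (dp : List Int) (a b : Int) :
    rangeSumRoundB S (some M) dp a b =
    (((PySem.List.pyRange 0 (S + 1) 1).foldl
      (fun (st : List Int × Int) y =>
        let w1 := if 0 ≤ y - a ∧ y - a ≤ S then st.2 + PySem.List.pyGetD dp (y - a) 0 else st.2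
        let w2 := if 0 ≤ y - b - 1 ∧ y - b - 1 ≤ S then w1 - PySem.List.pyGetD dp (y - b - 1) 0 else w1
        (st.1 ++ [if y < a then 0 else w2], w2)) ([], 0)).1).map (fun v => PySem.Int.mod v M) := rfl

-- B's row, entrywise
lemma roundB_spec (S : Int) (Mod : Option Int) (hS : 0 ≤ S) (dp : List Int) (a b : Int)
    (hab : S < a ∨ (0 ≤ a ∧ -1 ≤ b)) :
    (rangeSumRoundB S Mod dp a b).length = nN S ∧
    ∀ j : Nat, j < nN S →
      (rangeSumRoundB S Mod dp a b).getD j 0 = entB Mod S a b dp (j : Int) := by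
  have hn : nN S = S.toNat + 1 := by unfold nN; omega
  have hrw : PySem.List.pyRange 0 (S + 1) 1 = PySem.List.pyRange 0 ((nN S : Nat) : Int) 1 := by
    congr 1
    omega
  have hcore : ∀ j : Nat, j < nN S →
      (if (j : Int) < a then 0 else bW S a b dp (j + 1)) = coreB S a b dp (j : Int) := by
    intro j hj
    unfold coreB
    by_cases h1 : (j : Int) < a
    · rw [if_pos h1, if_pos h1]
    · rw [if_neg h1, if_neg h1]
      have hjS : (j : Int) ≤ S := by unfold nN at hj; omega
      rcases hab with h | ⟨ha, hb⟩
      · exact absurd h (by omega)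
      · rw [bW_closed S a b dp hS ha hb (j + 1) (by unfold nN at hj; push_cast; omega),
          show ((j+1 : Nat) : Int) - 1 - a = (j : Int) - a by push_cast; ring,
          show ((j+1 : Nat) : Int) - 1 - b - 1 = (j : Int) - b - 1 by push_cast; ring]
  cases Mod with
  | none =>
    rw [rangeSumRoundB_none, hrw, bloop_spec]
    refine ⟨by simp, ?_⟩
    intro j hj
    rw [List.getD_eq_getElem _ _ (by simpa using hj), List.getElem_map, List.getElem_range]
    rw [hcore j hj]
    rfl
  | some M =>
    rw [rangeSumRoundB_some, hrw, bloop_spec]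
    refine ⟨by simp, ?_⟩
    intro j hj
    rw [List.getD_eq_getElem _ _ (by simpa using hj), List.getElem_map, List.getElem_map,
      List.getElem_range]
    rw [hcore j hj]
    rfl

-- one round preserves the congruence invariant entrywise
lemma ent_cong (S : Int) (Mod : Option Int) (hS : 0 ≤ S) (a b : Int)
    (hab : S < a ∨ (0 ≤ a ∧ -1 ≤ b)) (dpA dpB : List Int)
    (hlA : dpA.length = nN S) (hlB : dpB.length = nN S)
    (hc : ∀ j : Nat, j < nN S → mcong Mod (dpA.getD j 0) (dpB.getD j 0)) :
    ∀ j : Nat, j < nN S → mcong Mod (entA Mod S dpA a b j) (entB Mod S a b dpB (j : Int)) := by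
  have hc' : ∀ i : Nat, mcong Mod (dpA.getD i 0) (dpB.getD i 0) := by
    intro i
    by_cases hi : i < nN S
    · exact hc i hi
    · rw [List.getD_eq_default _ _ (by omega), List.getD_eq_default _ _ (by omega)]
      exact mcong_refl 0
  have hp := prefN_cong hc'
  intro j hj
  -- each redc value is congruent to the corresponding prefN of dpB
  have hredc : ∀ i : Nat, mcong Mod (redc Mod dpA S i) (prefN dpB i) := by
    intro i
    cases Mod with
    | none => exact hp i
    | some M =>
      show mcong (some M) (redc (some M) dpA S i) (prefN dpB i)
      by_cases hiS : i < S.toNat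
      · have hr : redc (some M) dpA S i = PySem.Int.mod (prefN dpA i) M := by
          simp only [redc]
          rw [if_pos hiS]
        rw [hr]
        exact mcong_trans (Mod := some M) (pymod_modEq (prefN dpA i) M) (hp i)
      · have hr : redc (some M) dpA S i = prefN dpA i := by
          simp only [redc]
          rw [if_neg hiS]
        rw [hr]
        exact hp i
  unfold entA
  by_cases h1 : (j : Int) < a
  · rw [if_pos h1]
    cases Mod with
    | none =>
      show (0 : Int) = entB none S a b dpB (j : Int)
      simp only [entB, coreB]
      rw [if_pos h1]
    | some M =>
      show Int.ModEq M 0 (entB (some M) S a b dpB (j : Int))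
      simp only [entB, coreB]
      rw [if_pos h1]
      exact (pymod_modEq 0 M).symm
  · rw [if_neg h1]
    have hjS : (j : Int) ≤ S := by
      have : j < nN S := hj
      unfold nN at this
      omega
    have hb' : 0 ≤ a ∧ -1 ≤ b := by
      rcases hab with h | h
      · exact absurd h (by omega)
      · exact h
    have hcoreE : ∀ (u : Int), u = ((j : Int) - a) →
        prefI dpB u = prefN dpB ((j : Int) - a).toNat := by
      intro u hu
      subst hu
      exact prefI_nonneg dpB _ (by omega)
    by_cases h2 : (j : Int) ≤ b
    · rw [if_pos h2]
      have hBcore : coreB S a b dpB (j : Int) = prefN dpB ((j : Int) - a).toNat := by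
        unfold coreB
        rw [if_neg h1, prefI_nonneg dpB _ (by omega), prefI_neg dpB _ (by omega)]
        ring
      cases Mod with
      | none =>
        show redc none dpA S ((j : Int) - a).toNat = entB none S a b dpB (j : Int)
        simp only [entB]
        rw [hBcore]
        exact hredc _
      | some M =>
        show Int.ModEq M (redc (some M) dpA S ((j : Int) - a).toNat) (entB (some M) S a b dpB (j : Int))
        simp only [entB]
        rw [hBcore]
        exact mcong_trans (Mod := some M) (hredc _)
          ((pymod_modEq (prefN dpB ((j : Int) - a).toNat) M).symm)
    · rw [if_neg h2]
      have hBcore : coreB S a b dpB (j : Int)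
          = prefN dpB ((j : Int) - a).toNat - prefN dpB ((j : Int) - b - 1).toNat := by
        unfold coreB
        rw [if_neg h1, prefI_nonneg dpB _ (by omega), prefI_nonneg dpB _ (by omega)]
      have hsub : mcong Mod
          (redc Mod dpA S ((j : Int) - a).toNat - redc Mod dpA S ((j : Int) - b - 1).toNat)
          (prefN dpB ((j : Int) - a).toNat - prefN dpB ((j : Int) - b - 1).toNat) :=
        mcong_sub (hredc _) (hredc _)
      cases Mod with
      | none =>
        show _ = entB none S a b dpB (j : Int)
        simp only [entB]
        rw [hBcore]
        exact hsub
      | some M =>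
        show Int.ModEq M _ (entB (some M) S a b dpB (j : Int))
        simp only [entB]
        rw [hBcore]
        exact mcong_trans (Mod := some M) hsub
          ((pymod_modEq (prefN dpB ((j : Int) - a).toNat - prefN dpB ((j : Int) - b - 1).toNat) M).symm)

lemma main_fold (S : Int) (Mod : Option Int) (hS : 0 ≤ S) :
    ∀ (rs : List (Int × Int)) (dpA dpB : List Int),
      dpA.length = nN S → dpB.length = nN S →
      (∀ p ∈ rs, S < p.1 ∨ (0 ≤ p.1 ∧ -1 ≤ p.2)) →
      (∀ j : Nat, j < nN S → mcong Mod (dpA.getD j 0) (dpB.getD j 0)) →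
      (rs.foldl (fun dp ab => rangeSumRoundA S Mod dp ab.1 ab.2) dpA).length = nN S ∧
      (rs.foldl (fun dp ab => rangeSumRoundB S Mod dp ab.1 ab.2) dpB).length = nN S ∧
      ∀ j : Nat, j < nN S →
        mcong Mod ((rs.foldl (fun dp ab => rangeSumRoundA S Mod dp ab.1 ab.2) dpA).getD j 0)
          ((rs.foldl (fun dp ab => rangeSumRoundB S Mod dp ab.1 ab.2) dpB).getD j 0) := by
  intro rs
  induction rs with
  | nil => intro dpA dpB hA hB _ hc; exact ⟨hA, hB, hc⟩
  | cons p t ih =>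
    intro dpA dpB hA hB hps hc
    have hab := hps p (List.mem_cons_self)
    have hrA := roundA_spec S Mod hS dpA hA p.1 p.2 hab
    have hrB := roundB_spec S Mod hS dpB p.1 p.2 hab
    have hent := ent_cong S Mod hS p.1 p.2 hab dpA dpB hA hB hc
    have hc' : ∀ j : Nat, j < nN S →
        mcong Mod ((rangeSumRoundA S Mod dpA p.1 p.2).getD j 0)
          ((rangeSumRoundB S Mod dpB p.1 p.2).getD j 0) := by
      intro j hj
      rw [hrA.2 j hj, hrB.2 j hj]
      exact hent j hj
    simp only [List.foldl_cons]
    exact ih _ _ hrA.1 hrB.1 (fun q hq => hps q (List.mem_cons_of_mem _ hq)) hc'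

lemma init_eq (S : Int) (hS : 0 ≤ S) :
    PySem.List.pySetD (List.replicate (S + 1).toNat (0:Int)) 0 1 = 1 :: List.replicate S.toNat 0 := by
  have h : (S + 1).toNat = S.toNat + 1 := by omega
  rw [h, List.replicate_succ]
  exact (PySem.List.pySetD_natCast _ 0 _).trans (by simp)

-- definitional equations of the ports at a literal Mod (each is rfl)
lemma range_sum_dp_none (ranges : List (Int × Int)) (S : Int) :
    range_sum_dp ranges S none = ranges.foldl (fun dp ab => rangeSumRoundA S none dp ab.1 ab.2)
      (PySem.List.pySetD (List.replicate (S + 1).toNat 0) 0 1) := rfl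

lemma range_sum_dp_some (ranges : List (Int × Int)) (S M : Int) :
    range_sum_dp ranges S (some M) = (ranges.foldl (fun dp ab => rangeSumRoundA S (some M) dp ab.1 ab.2)
      (PySem.List.pySetD (List.replicate (S + 1).toNat 0) 0 1)).map (fun y => PySem.Int.mod y M) := rfl

lemma range_sum_dp_alt_none (ranges : List (Int × Int)) (S : Int) :
    range_sum_dp_alt ranges S none = ranges.foldl (fun dp ab => rangeSumRoundB S none dp ab.1 ab.2)
      (1 :: List.replicate S.toNat 0) := rfl

lemma range_sum_dp_alt_some (ranges : List (Int × Int)) (S M : Int) :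
    range_sum_dp_alt ranges S (some M) = (ranges.foldl (fun dp ab => rangeSumRoundB S (some M) dp ab.1 ab.2)
      (1 :: List.replicate S.toNat 0)).map (fun v => PySem.Int.mod v M) := rfl

-- ===== VERDICT (by name: the statement is the Claim_ definition above) =====
theorem range_sum_dp_spec : Claim_equal_range_sum_dp := by
  unfold Claim_equal_range_sum_dp
  intro ranges S Mod hdom hpre
  obtain ⟨hS, hM, hps⟩ := hpre
  unfold Spec_range_sum_dp
  have hn : nN S = S.toNat + 1 := by unfold nN; omega
  have hinit := init_eq S hS
  have hlen0 : (1 :: List.replicate S.toNat (0:Int)).length = nN S := by simp [hn]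
  have hlen0A : (PySem.List.pySetD (List.replicate (S + 1).toNat (0:Int)) 0 1).length = nN S :=
    (congrArg List.length hinit).trans hlen0
  have hc0 : ∀ j : Nat, j < nN S →
      mcong Mod ((PySem.List.pySetD (List.replicate (S + 1).toNat (0:Int)) 0 1).getD j 0)
        ((1 :: List.replicate S.toNat (0:Int)).getD j 0) :=
    fun j _ => mcong_of_eq (congrArg (fun l => l.getD j 0) hinit)
  obtain ⟨hlA, hlB, hcong⟩ := main_fold S Mod hS ranges _ _ hlen0A hlen0 hps hc0
  cases Mod with
  | none =>
    rw [range_sum_dp_none, range_sum_dp_alt_none]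
    apply List.ext_getElem (by rw [hlA, hlB])
    intro i h1 h2
    have hi : i < nN S := by rw [← hlA]; exact h1
    have hcc := hcong i hi
    rw [List.getD_eq_getElem _ _ h1, List.getD_eq_getElem _ _ h2] at hcc
    exact hcc
  | some M =>
    have hM' : M ≠ 0 := fun h => hM (by rw [h])
    rw [range_sum_dp_some, range_sum_dp_alt_some]
    apply List.ext_getElem (by simp [hlA, hlB])
    intro i h1 h2
    rw [List.getElem_map, List.getElem_map]
    have hi : i < nN S := by rw [← hlA]; simpa using h1
    have hcc := hcong i hi
    rw [List.getD_eq_getElem _ _ (by simpa using h1),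
      List.getD_eq_getElem _ _ (by simpa using h2)] at hcc
    exact pymod_eq_of_modEq hM' hcc
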